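-- pv_equiv track=rewrite | github.com/TubeSound/NWO | technical.py | detect_terms
-- ===== SOURCE A (Python) =====
-- def detect_terms(vector, value):
--     terms = []
--     n = len(vector)
--     begin = None
--     for i in range(n):
--         if begin is None:
--             if vector[i] == value:
--                 begin = i
--         else:
--             if vector[i] != value:
--                 terms.append([begin, i - 1])
--                 begin = None
--     if begin is not None:
--         terms.append([begin, n - 1])
--     return terms
-- ===== SOURCE B (Python) =====
-- def detect_terms(vector, value):
--     prev = [None] + vector[:-1]
--     nxt = vector[1:] + [None]
--     starts = [i for i, (p, x) in enumerate(zip(prev, vector)) if x == value and p != value]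
--     ends = [i for i, (x, q) in enumerate(zip(vector, nxt)) if x == value and q != value]
--     return [[b, e] for b, e in zip(starts, ends)]
-- ===== Notes on version B (the rewrite author's own statement) =====
-- stated objective: alternative
-- what changed: Replaces A's single stateful begin/None scan by stateless boundary detection: two passes over the vector zipped with shifted copies of itself mark run starts (x==value, prev!=value) and run ends (x==value, next!=value), and the result is starts zipped with ends.
import Mathlib
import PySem

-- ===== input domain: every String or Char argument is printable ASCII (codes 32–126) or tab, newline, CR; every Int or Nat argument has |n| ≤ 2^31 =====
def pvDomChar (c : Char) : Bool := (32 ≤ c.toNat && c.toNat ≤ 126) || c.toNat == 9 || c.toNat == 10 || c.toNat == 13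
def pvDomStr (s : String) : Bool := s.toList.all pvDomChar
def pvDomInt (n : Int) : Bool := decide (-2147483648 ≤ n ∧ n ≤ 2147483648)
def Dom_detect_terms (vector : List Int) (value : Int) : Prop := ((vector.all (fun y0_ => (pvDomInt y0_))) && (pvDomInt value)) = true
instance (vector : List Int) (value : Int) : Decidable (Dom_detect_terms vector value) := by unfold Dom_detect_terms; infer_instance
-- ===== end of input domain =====

-- B replaces A's stateful begin/None scan by stateless boundary detection: zip the
-- vector with shifted copies of itself to mark run starts and run ends, then zip
-- starts with ends (alternative decomposition, same O(n) cost).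

-- ===== PORT A =====
-- literal transliteration of A's index loop with its (terms, begin) state
def detect_terms (vector : List Int) (value : Int) : List (List Int) :=
  let n : Int := PySem.List.len vector
  let st := (PySem.List.pyRange 0 n 1).foldl
    (fun (st : List (List Int) × Option Int) i =>
      match st.2 with
      | none => if PySem.List.pyGetD vector i 0 = value then (st.1, some i) else (st.1, none)
      | some b => if PySem.List.pyGetD vector i 0 ≠ value then (st.1 ++ [[b, i - 1]], none) else (st.1, some b))
    ([], none)
  match st.2 with
  | some b => st.1 ++ [[b, n - 1]]
  | none => st.1

-- ===== PORT B =====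
-- [None] + vector[:-1] and vector[1:] + [None] are lists of Option Int (None ↦ none)
def detect_terms_alt (vector : List Int) (value : Int) : List (List Int) :=
  let prev : List (Option Int) := none :: (PySem.List.slice vector none (some (-1))).map some
  let nxt : List (Option Int) := (PySem.List.slice vector (some 1) none).map some ++ [none]
  let starts : List Int := ((PySem.List.enumerate (prev.zip vector) 0).filter
      (fun r => r.2.2 == value && r.2.1 != some value)).map (fun r => r.1)
  let ends : List Int := ((PySem.List.enumerate (vector.zip nxt) 0).filter
      (fun r => r.2.1 == value && r.2.2 != some value)).map (fun r => r.1)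
  (starts.zip ends).map (fun p => [p.1, p.2])

-- ===== PRECONDITION & SPEC =====
def Spec_detect_terms (vector : List Int) (value : Int) (out : List (List Int)) : Prop := out = detect_terms_alt vector value
instance (vector : List Int) (value : Int) (out : List (List Int)) : Decidable (Spec_detect_terms vector value out) := by unfold Spec_detect_terms; infer_instance

-- ===== CLAIM (what is proved, stated in full; the proofs are below) =====
def Claim_equal_detect_terms : Prop := ∀ (vector : List Int) (value : Int), Dom_detect_terms vector value → Spec_detect_terms vector value (detect_terms vector value)

-- ===== LEMMAS AND PROOFS =====

-- canonical reference: structural recursion on the vector with state (offset, pending run start)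
def pvSpec (v : Int) : List Int → Int → Option Int → List (List Int)
  | [], _, none => []
  | [], s, some b => [[b, s - 1]]
  | x :: xs, s, none => if x = v then pvSpec v xs (s + 1) (some s) else pvSpec v xs (s + 1) none
  | x :: xs, s, some b => if x = v then pvSpec v xs (s + 1) (some b) else [[b, s - 1]] ++ pvSpec v xs (s + 1) none

-- A's loop (over (index, element) pairs) + final flush computes pvSpec
theorem pvA_loop (v : Int) (xs : List Int) : ∀ (s : Int) (terms : List (List Int)) (bo : Option Int),
    (match ((PySem.List.enumerate xs s).foldl
      (fun (st : List (List Int) × Option Int) (p : Int × Int) =>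
        match st.2 with
        | none => if p.2 = v then (st.1, some p.1) else (st.1, none)
        | some b => if p.2 ≠ v then (st.1 ++ [[b, p.1 - 1]], none) else (st.1, some b))
      (terms, bo)).2 with
     | some b => ((PySem.List.enumerate xs s).foldl
      (fun (st : List (List Int) × Option Int) (p : Int × Int) =>
        match st.2 with
        | none => if p.2 = v then (st.1, some p.1) else (st.1, none)
        | some b => if p.2 ≠ v then (st.1 ++ [[b, p.1 - 1]], none) else (st.1, some b))
      (terms, bo)).1 ++ [[b, s + (xs.length : Int) - 1]]
     | none => ((PySem.List.enumerate xs s).foldl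
      (fun (st : List (List Int) × Option Int) (p : Int × Int) =>
        match st.2 with
        | none => if p.2 = v then (st.1, some p.1) else (st.1, none)
        | some b => if p.2 ≠ v then (st.1 ++ [[b, p.1 - 1]], none) else (st.1, some b))
      (terms, bo)).1)
    = terms ++ pvSpec v xs s bo := by
  induction xs with
  | nil =>
    intro s terms bo
    cases bo <;> simp [PySem.List.enumerate, pvSpec]
  | cons x xs ih =>
    intro s terms bo
    rw [PySem.List.enumerate_cons]
    have hlen : s + (((x :: xs).length : Nat) : Int) - 1 = (s + 1) + ((xs.length : Nat) : Int) - 1 := by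
      push_cast [List.length_cons]; ring
    cases bo with
    | none =>
      by_cases hx : x = v
      · simp only [List.foldl_cons, pvSpec, hlen]
        rw [if_pos hx, if_pos hx]
        exact ih (s + 1) terms (some s)
      · simp only [List.foldl_cons, pvSpec, hlen]
        rw [if_neg hx, if_neg hx]
        exact ih (s + 1) terms none
    | some b =>
      by_cases hx : x = v
      · simp only [List.foldl_cons, pvSpec, hlen, ne_eq]
        rw [if_neg (by simpa using hx), if_pos hx]
        exact ih (s + 1) terms (some b)
      · simp only [List.foldl_cons, pvSpec, hlen, ne_eq]
        rw [if_pos (by simpa using hx), if_neg hx]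
        rw [ih (s + 1) (terms ++ [[b, s - 1]]) none]
        simp

-- ===== structural views of B's shifted-zip passes =====

-- zip(prev, vector): each element with its predecessor (q = element before the block)
def pvPairsP (xs : List Int) (q : Option Int) : List (Option Int × Int) :=
  match xs with
  | [] => []
  | x :: rest => (q, x) :: pvPairsP rest (some x)

-- zip(vector, nxt): each element with its successor
def pvPairsN (xs : List Int) : List (Int × Option Int) :=
  match xs with
  | [] => []
  | [x] => [(x, none)]
  | x :: y :: rest => (x, some y) :: pvPairsN (y :: rest)

-- indices of run starts / run ends, structurally
def pvStarts (v : Int) (xs : List Int) (s : Int) (q : Option Int) : List Int :=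
  match xs with
  | [] => []
  | x :: rest => (if x == v && q != some v then [s] else []) ++ pvStarts v rest (s + 1) (some x)

def pvEnds (v : Int) (xs : List Int) (s : Int) : List Int :=
  match xs with
  | [] => []
  | [x] => if x == v then [s] else []
  | x :: y :: rest => (if x == v && y != v then [s] else []) ++ pvEnds v (y :: rest) (s + 1)

-- ends when the element at index s-1 (just before xs) equals v (a run is pending)
def pvEndsP (v : Int) (xs : List Int) (s : Int) : List Int :=
  match xs with
  | [] => [s - 1]
  | x :: _ => if x != v then (s - 1) :: pvEnds v xs s else pvEnds v xs s

theorem pvZipPrev (xs : List Int) : ∀ (q : Option Int),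
    (q :: xs.dropLast.map some).zip xs = pvPairsP xs q := by
  induction xs with
  | nil => intro q; simp [pvPairsP]
  | cons x rest ih =>
    intro q
    cases rest with
    | nil => simp [pvPairsP]
    | cons y rest' =>
      have : (x :: y :: rest').dropLast = x :: (y :: rest').dropLast := rfl
      rw [pvPairsP, this]
      simp only [List.map_cons, List.zip_cons_cons]
      rw [← ih (some x)]
      simp

theorem pvZipNext (xs : List Int) :
    xs.zip (xs.tail.map some ++ [none]) = pvPairsN xs := by
  induction xs using pvPairsN.induct with
  | case1 => simp [pvPairsN]
  | case2 x => simp [pvPairsN]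
  | case3 x y rest ih =>
    rw [pvPairsN]
    simp only [List.tail_cons, List.map_cons, List.cons_append, List.zip_cons_cons]
    rw [← ih]
    rfl

theorem pvStarts_filter (v : Int) (xs : List Int) : ∀ (s : Int) (q : Option Int),
    ((PySem.List.enumerate (pvPairsP xs q) s).filter
      (fun r => r.2.2 == v && r.2.1 != some v)).map (fun r => r.1) = pvStarts v xs s q := by
  induction xs with
  | nil => intro s q; simp [pvPairsP, pvStarts]
  | cons x rest ih =>
    intro s q
    rw [pvPairsP, pvStarts, PySem.List.enumerate_cons, List.filter_cons]
    by_cases h : (x == v && q != some v) = true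
    · simp only [h, if_pos]
      simp only [List.map_cons, ih (s + 1) (some x)]
      simp
    · simp only [h]
      simp only [Bool.false_eq_true, if_false, ih (s + 1) (some x)]
      simp

theorem pvEnds_filter (v : Int) (xs : List Int) : ∀ (s : Int),
    ((PySem.List.enumerate (pvPairsN xs) s).filter
      (fun r => r.2.1 == v && r.2.2 != some v)).map (fun r => r.1) = pvEnds v xs s := by
  induction xs using pvPairsN.induct with
  | case1 => intro s; simp [pvPairsN, pvEnds]
  | case2 x =>
    intro s
    simp only [pvPairsN, pvEnds, PySem.List.enumerate_cons, PySem.List.enumerate_nil,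
      List.filter_cons]
    by_cases h : x = v
    · simp [h]
    · simp [h]
  | case3 x y rest ih =>
    intro s
    rw [pvPairsN, pvEnds, PySem.List.enumerate_cons, List.filter_cons]
    by_cases h : (x == v && y != v) = true
    · have h' : ((x == v && (some y != some v))) = true := by
        simp only [bne] at *
        simpa using h
      simp only [h', if_pos]
      simp only [List.map_cons, ih (s + 1)]
      simp [h]
    · have h' : ¬ ((x == v && (some y != some v)) = true) := by
        simp only [bne] at *
        simpa using h
      simp only [h']
      simp only [Bool.false_eq_true, if_false, ih (s + 1)]
      simp [h]

theorem pvEnds_cons_eq (v x : Int) (rest : List Int) (s : Int) (hx : x = v) :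
    pvEnds v (x :: rest) s = pvEndsP v rest (s + 1) := by
  cases rest with
  | nil => simp [pvEnds, pvEndsP, hx]
  | cons y rest' =>
    by_cases hy : y = v
    · simp [pvEnds, pvEndsP, hx, hy]
    · simp [pvEnds, pvEndsP, hx, hy]

theorem pvEnds_cons_ne (v x : Int) (rest : List Int) (s : Int) (hx : x ≠ v) :
    pvEnds v (x :: rest) s = pvEnds v rest (s + 1) := by
  cases rest with
  | nil => simp [pvEnds, hx]
  | cons y rest' => simp [pvEnds, hx]

-- main invariant: zipping starts with ends yields exactly the state machine's result
theorem pvMain (v : Int) (xs : List Int) : ∀ (s : Int) (q : Option Int) (b : Int),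
    (q ≠ some v →
      ((pvStarts v xs s q).zip (pvEnds v xs s)).map (fun p => [p.1, p.2]) = pvSpec v xs s none)
    ∧ (((b :: pvStarts v xs s (some v)).zip (pvEndsP v xs s)).map (fun p => [p.1, p.2])
        = pvSpec v xs s (some b)) := by
  induction xs with
  | nil =>
    intro s q b
    exact ⟨fun _ => by simp [pvStarts, pvEnds, pvSpec],
           by simp [pvStarts, pvEndsP, pvSpec]⟩
  | cons x rest ih =>
    intro s q b
    constructor
    · intro hq
      by_cases hx : x = v
      · subst hx
        have hcond : (x == x && q != some x) = true := by
          simp [bne]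
          cases q with
          | none => simp
          | some a => simpa using fun h => hq (by rw [h])
        rw [pvStarts, hcond, pvEnds_cons_eq x x rest s rfl]
        simp only [if_pos, List.singleton_append]
        rw [pvSpec, if_pos rfl]
        exact (ih (s + 1) (some x) s).2
      · have hcond : ¬ ((x == v && q != some v) = true) := by simp [hx]
        rw [pvStarts, pvEnds_cons_ne v x rest s hx]
        simp only [hcond, Bool.false_eq_true, if_false, List.nil_append]
        rw [pvSpec, if_neg hx]
        exact (ih (s + 1) (some x) b).1 (by simpa using hx)
    · by_cases hx : x = v
      · subst hx
        have hcond : ¬ ((x == x && (some x : Option Int) != some x) = true) := by simp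
        rw [pvStarts]
        simp only [hcond, Bool.false_eq_true, if_false, List.nil_append]
        rw [pvEndsP]
        have hne : ¬ ((x != x) = true) := by simp
        simp only [hne, Bool.false_eq_true, if_false]
        rw [pvEnds_cons_eq x x rest s rfl, pvSpec, if_pos rfl]
        exact (ih (s + 1) (some x) b).2
      · have hcond : ¬ ((x == v && (some v : Option Int) != some v) = true) := by simp
        rw [pvStarts]
        simp only [hcond, Bool.false_eq_true, if_false, List.nil_append]
        rw [pvEndsP]
        have hne : (x != v) = true := by simp [hx]
        simp only [hne, if_pos]
        rw [pvEnds_cons_ne v x rest s hx, List.zip_cons_cons, List.map_cons]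
        rw [(ih (s + 1) (some x) b).1 (by simpa using hx)]
        rw [pvSpec, if_neg hx]
        rfl

theorem pvB_eq_spec (vector : List Int) (value : Int) :
    detect_terms_alt vector value = pvSpec value vector 0 none := by
  unfold detect_terms_alt
  dsimp only
  rw [PySem.List.slice_to_neg_one, PySem.List.slice_from_one]
  rw [pvZipPrev vector none, pvZipNext vector]
  rw [pvStarts_filter value vector 0 none, pvEnds_filter value vector 0]
  exact (pvMain value vector 0 none 0).1 (by simp)

theorem pvA_eq_spec (vector : List Int) (value : Int) :
    detect_terms vector value = pvSpec value vector 0 none := by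
  unfold detect_terms
  have h := pvA_loop value vector 0 [] none
  rw [PySem.List.enumerate_eq_map_pyRange vector 0, List.foldl_map] at h
  simpa [PySem.List.len_eq] using h

-- ===== VERDICT (by name: the statement is the Claim_ definition above) =====
theorem detect_terms_spec : Claim_equal_detect_terms := by
  unfold Claim_equal_detect_terms
  intro vector value _
  unfold Spec_detect_terms
  rw [pvA_eq_spec, pvB_eq_spec]
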